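-- pv_equiv track=rewrite | github.com/codewithwest/python_console_projects | Bootcamp/UsernameGenerator.py | create_user_name
-- ===== SOURCE A (Python) =====
-- def create_user_name(first_name, last_name, cohort, final_campus):
--     f_n = True
--     while f_n:
--         if len(first_name) < 3:
--             first_name = first_name + "o"
--         else:
--             first_name = first_name[-3:].lower()
--             f_n = False
--     l_n = True
--     while l_n:
--         if len(last_name) < 3:
--             last_name = last_name + "o"
--         else:
--             last_name = last_name[0:3:1].lower()
--             l_n = False
--
--     cohort = str(cohort)
--     final_campus = final_campus
--     return first_name + last_name + cohort + final_campus
-- ===== SOURCE B (Python) =====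
-- def _pick(s, start):
--     # character at offset start+i of s, lowercased, or the filler "o" past the end
--     return "".join(s[start + i].lower() if start + i < len(s) else "o" for i in range(3))
--
-- def create_user_name(first_name, last_name, cohort, final_campus):
--     f = _pick(first_name, max(len(first_name), 3) - 3)
--     l = _pick(last_name, 0)
--     return f + l + str(cohort) + final_campus
-- ===== Notes on version B (the rewrite author's own statement) =====
-- stated objective: alternative
-- what changed: Instead of mutating the name strings by repeatedly appending 'o' and then slicing, B never builds padded strings at all: it computes each of the three output characters positionally (index max(len,3)-3+i for the first name, i for the last name), emitting the filler 'o' when the index is past the end.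
import Mathlib
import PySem

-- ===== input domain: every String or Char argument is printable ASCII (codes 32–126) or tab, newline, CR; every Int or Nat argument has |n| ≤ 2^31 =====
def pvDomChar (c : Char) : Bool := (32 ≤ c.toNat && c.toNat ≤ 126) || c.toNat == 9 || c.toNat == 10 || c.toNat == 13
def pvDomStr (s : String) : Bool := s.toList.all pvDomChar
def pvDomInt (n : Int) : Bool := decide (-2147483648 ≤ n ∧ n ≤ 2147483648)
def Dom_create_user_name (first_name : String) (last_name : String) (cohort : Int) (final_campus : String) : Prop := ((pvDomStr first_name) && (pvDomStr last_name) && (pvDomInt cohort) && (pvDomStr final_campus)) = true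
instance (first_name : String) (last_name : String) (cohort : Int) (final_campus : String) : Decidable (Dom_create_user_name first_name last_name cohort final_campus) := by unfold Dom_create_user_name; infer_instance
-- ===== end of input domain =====

-- B builds the three output characters of each name part positionally (index arithmetic
-- with an 'o' filler past the end) instead of A's pad-by-appending loops plus slicing;
-- objective: alternative (no intermediate padded strings).

-- ===== PORT A =====
-- the first while-loop: append "o" while len < 3, then take [-3:].lower()
def pvPadFirstA (s : List Char) : List Char :=
  if s.length < 3 then pvPadFirstA (s ++ ['o'])
  else PySem.Chars.lower (PySem.List.slice s (some (-3)) none)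
termination_by 3 - s.length
decreasing_by simp; omega

-- the second while-loop: append "o" while len < 3, then take [0:3:1].lower()
def pvPadLastA (s : List Char) : List Char :=
  if s.length < 3 then pvPadLastA (s ++ ['o'])
  else PySem.Chars.lower (PySem.List.slice s (some 0) (some 3))
termination_by 3 - s.length
decreasing_by simp; omega

def create_user_name (first_name : String) (last_name : String) (cohort : Int) (final_campus : String) : String :=
  String.mk (pvPadFirstA first_name.toList ++ pvPadLastA last_name.toList
    ++ PySem.Int.toChars cohort ++ final_campus.toList)

-- ===== PORT B =====
-- _pick(s, start): char at start+i lowercased, or the filler 'o' past the end, for i in range(3)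
def pvPick (s : List Char) (start : Nat) : List Char :=
  (List.range 3).map (fun i =>
    if start + i < s.length then PySem.Chars.lowerChar (s.getD (start + i) 'o') else 'o')

def create_user_name_alt (first_name : String) (last_name : String) (cohort : Int) (final_campus : String) : String :=
  String.mk (pvPick first_name.toList (max first_name.toList.length 3 - 3)
    ++ pvPick last_name.toList 0
    ++ PySem.Int.toChars cohort ++ final_campus.toList)

-- ===== PRECONDITION & SPEC =====
def Spec_create_user_name (first_name : String) (last_name : String) (cohort : Int) (final_campus : String) (out : String) : Prop := out = create_user_name_alt first_name last_name cohort final_campus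
instance (first_name : String) (last_name : String) (cohort : Int) (final_campus : String) (out : String) : Decidable (Spec_create_user_name first_name last_name cohort final_campus out) := by unfold Spec_create_user_name; infer_instance

-- ===== CLAIM (what is proved, stated in full; the proofs are below) =====
def Claim_equal_create_user_name : Prop := ∀ (first_name : String) (last_name : String) (cohort : Int) (final_campus : String), Dom_create_user_name first_name last_name cohort final_campus → Spec_create_user_name first_name last_name cohort final_campus (create_user_name first_name last_name cohort final_campus)

-- ===== LEMMAS AND PROOFS =====
lemma lowerChar_o : PySem.Chars.lowerChar 'o' = 'o' := by decide

-- when start+3 ≤ len, pvPick is exactly lower of the 3-window at start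
lemma pvPick_ge (s : List Char) (start : Nat) (h : start + 3 ≤ s.length) :
    pvPick s start = PySem.Chars.lower (List.take 3 (s.drop start)) := by
  apply List.ext_getElem
  · simp [pvPick, PySem.Chars.lower]; omega
  · intro i h1 h2
    simp only [pvPick, PySem.Chars.lower, List.getElem_map, List.getElem_range,
      List.getElem_take, List.getElem_drop]
    have hi : i < 3 := by simpa [pvPick] using h1
    rw [if_pos (by omega)]
    congr 1
    rw [List.getD_eq_getElem _ _ (by omega)]

lemma pvPadFirstA_eq (s : List Char) :
    pvPadFirstA s = pvPick s (max s.length 3 - 3) := by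
  rcases s with _ | ⟨a, _ | ⟨b, _ | ⟨c, rest⟩⟩⟩
  · rw [pvPadFirstA, pvPadFirstA, pvPadFirstA, pvPadFirstA]
    rw [if_pos (by simp), if_pos (by simp), if_pos (by simp), if_neg (by simp)]
    rw [PySem.List.slice_from_neg_ofNat _ 3 (by omega)]
    simp [pvPick, PySem.Chars.lower, List.range_succ, lowerChar_o]
  · rw [pvPadFirstA, pvPadFirstA, pvPadFirstA]
    rw [if_pos (by simp), if_pos (by simp), if_neg (by simp)]
    rw [PySem.List.slice_from_neg_ofNat _ 3 (by omega)]
    simp [pvPick, PySem.Chars.lower, List.range_succ, lowerChar_o]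
  · rw [pvPadFirstA, pvPadFirstA]
    rw [if_pos (by simp), if_neg (by simp)]
    rw [PySem.List.slice_from_neg_ofNat _ 3 (by omega)]
    simp [pvPick, PySem.Chars.lower, List.range_succ, lowerChar_o]
  · have hlen : (a :: b :: c :: rest).length = rest.length + 3 := by simp
    rw [pvPadFirstA, if_neg (by omega)]
    rw [PySem.List.slice_from_neg_ofNat _ 3 (by omega)]
    rw [pvPick_ge _ _ (by omega)]
    congr 1
    rw [List.take_of_length_le (by simp; omega)]
    congr 1
    omega

lemma pvPadLastA_eq (s : List Char) :
    pvPadLastA s = pvPick s 0 := by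
  rcases s with _ | ⟨a, _ | ⟨b, _ | ⟨c, rest⟩⟩⟩
  · rw [pvPadLastA, pvPadLastA, pvPadLastA, pvPadLastA]
    rw [if_pos (by simp), if_pos (by simp), if_pos (by simp), if_neg (by simp)]
    rw [PySem.List.slice_zero_start, PySem.List.slice_to _ (by omega : (0:Int) ≤ 3)]
    simp [pvPick, PySem.Chars.lower, List.range_succ, lowerChar_o]
  · rw [pvPadLastA, pvPadLastA, pvPadLastA]
    rw [if_pos (by simp), if_pos (by simp), if_neg (by simp)]
    rw [PySem.List.slice_zero_start, PySem.List.slice_to _ (by omega : (0:Int) ≤ 3)]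
    simp [pvPick, PySem.Chars.lower, List.range_succ, lowerChar_o]
  · rw [pvPadLastA, pvPadLastA]
    rw [if_pos (by simp), if_neg (by simp)]
    rw [PySem.List.slice_zero_start, PySem.List.slice_to _ (by omega : (0:Int) ≤ 3)]
    simp [pvPick, PySem.Chars.lower, List.range_succ, lowerChar_o]
  · rw [pvPadLastA, if_neg (by simp)]
    rw [PySem.List.slice_zero_start, PySem.List.slice_to _ (by omega : (0:Int) ≤ 3)]
    rw [pvPick_ge _ _ (by simp)]
    simp

-- ===== VERDICT (by name: the statement is the Claim_ definition above) =====
theorem create_user_name_spec : Claim_equal_create_user_name := by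
  intro f l c fc _
  unfold Spec_create_user_name create_user_name create_user_name_alt
  rw [pvPadFirstA_eq, pvPadLastA_eq]
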